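-- pv_equiv track=rewrite | github.com/StarsExpress/LeetCode-Repository | greedy/zigzag_integers.py | count_zigzag_moves
-- ===== SOURCE A (Python) =====
-- def count_zigzag_moves(numbers: list[int]) -> int:  # LeetCode Q.1144.
--     odd_indexed_numbers, odd_moves = numbers.copy(), 0  # Use copy to separate modification.
--     even_indexed_nums, even_moves = numbers.copy(), 0  # Use copy to separate modification.
--     total_numbers = len(numbers)
--
--     for i in range(total_numbers // 2):  # Make every odd-indexed > adjacent numbers.
--         if odd_indexed_numbers[2 * i] >= odd_indexed_numbers[2 * i + 1]:
--             move = odd_indexed_numbers[2 * i] + 1 - odd_indexed_numbers[2 * i + 1]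
--             odd_indexed_numbers[2 * i] -= move  # Only decrement is allowed.
--             odd_moves += move
--
--         if 2 * i + 2 < total_numbers:
--             if odd_indexed_numbers[2 * i + 2] >= odd_indexed_numbers[2 * i + 1]:
--                 move = odd_indexed_numbers[2 * i + 2] + 1 - odd_indexed_numbers[2 * i + 1]
--                 odd_indexed_numbers[2 * i + 2] -= move  # Only decrement is allowed.
--                 odd_moves += move
--
--     for i in range(total_numbers // 2):  # Make every even-indexed > adjacent numbers.
--         if even_indexed_nums[2 * i + 1] >= even_indexed_nums[2 * i]:
--             move = even_indexed_nums[2 * i + 1] + 1 - even_indexed_nums[2 * i]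
--             even_indexed_nums[2 * i + 1] -= move  # Only decrement is allowed.
--             even_moves += move
--
--         if 2 * i + 2 < total_numbers:
--             if even_indexed_nums[2 * i + 1] >= even_indexed_nums[2 * i + 2]:
--                 move = even_indexed_nums[2 * i + 1] + 1 - even_indexed_nums[2 * i + 2]
--                 even_indexed_nums[2 * i + 1] -= move  # Only decrement is allowed.
--                 even_moves += move
--
--     return min(odd_moves, even_moves)
-- ===== SOURCE B (Python) =====
-- def count_zigzag_moves(numbers: list[int]) -> int:  # LeetCode Q.1144.
--     n = len(numbers)
--     res = [0, 0]  # res[0]: cost to make odd indices peaks; res[1]: even indices peaks.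
--     for i in range(n):
--         nbrs = []
--         if i > 0:
--             nbrs.append(numbers[i - 1])
--         if i + 1 < n:
--             nbrs.append(numbers[i + 1])
--         if nbrs:
--             res[i % 2] += max(numbers[i] - min(nbrs) + 1, 0)
--     return min(res)
-- ===== Notes on version B (the rewrite author's own statement) =====
-- stated objective: simpler
-- what changed: Replaces A's two mutating copy-and-lower passes over index pairs with one non-mutating pass that, for each index, adds max(numbers[i] - min(existing neighbors) + 1, 0) to a parity-indexed accumulator.
import Mathlib
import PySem

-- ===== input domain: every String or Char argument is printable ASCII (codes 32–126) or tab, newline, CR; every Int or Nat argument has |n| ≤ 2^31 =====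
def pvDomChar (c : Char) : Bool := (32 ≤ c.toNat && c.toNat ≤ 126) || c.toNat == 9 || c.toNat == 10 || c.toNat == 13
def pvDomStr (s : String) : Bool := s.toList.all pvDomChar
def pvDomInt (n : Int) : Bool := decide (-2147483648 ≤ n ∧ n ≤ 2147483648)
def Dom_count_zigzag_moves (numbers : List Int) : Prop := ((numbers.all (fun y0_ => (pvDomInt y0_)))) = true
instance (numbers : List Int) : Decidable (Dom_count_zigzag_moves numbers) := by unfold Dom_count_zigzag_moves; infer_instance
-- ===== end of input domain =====

-- B replaces A's two mutating copy-and-lower passes with one non-mutating pass that adds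
-- max(numbers[i] - min(existing neighbors) + 1, 0) to a parity-indexed accumulator (objective: simpler).

-- ===== PORT A =====
-- loop body of A's first pass ("make every odd-indexed > adjacent"); state = (odd_indexed_numbers, odd_moves)
def zzPass1Body (total : Int) (st : List Int × Int) (i : Int) : List Int × Int :=
  let st1 : List Int × Int :=
    if PySem.List.pyGetD st.1 (2*i) 0 ≥ PySem.List.pyGetD st.1 (2*i + 1) 0 then
      let move := PySem.List.pyGetD st.1 (2*i) 0 + 1 - PySem.List.pyGetD st.1 (2*i + 1) 0
      (PySem.List.pySetD st.1 (2*i) (PySem.List.pyGetD st.1 (2*i) 0 - move), st.2 + move)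
    else st
  if 2*i + 2 < total then
    if PySem.List.pyGetD st1.1 (2*i + 2) 0 ≥ PySem.List.pyGetD st1.1 (2*i + 1) 0 then
      let move := PySem.List.pyGetD st1.1 (2*i + 2) 0 + 1 - PySem.List.pyGetD st1.1 (2*i + 1) 0
      (PySem.List.pySetD st1.1 (2*i + 2) (PySem.List.pyGetD st1.1 (2*i + 2) 0 - move), st1.2 + move)
    else st1
  else st1


-- loop body of A's second pass ("make every even-indexed > adjacent"); state = (even_indexed_nums, even_moves)
def zzPass2Body (total : Int) (st : List Int × Int) (i : Int) : List Int × Int :=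
  let st1 : List Int × Int :=
    if PySem.List.pyGetD st.1 (2*i + 1) 0 ≥ PySem.List.pyGetD st.1 (2*i) 0 then
      let move := PySem.List.pyGetD st.1 (2*i + 1) 0 + 1 - PySem.List.pyGetD st.1 (2*i) 0
      (PySem.List.pySetD st.1 (2*i + 1) (PySem.List.pyGetD st.1 (2*i + 1) 0 - move), st.2 + move)
    else st
  if 2*i + 2 < total then
    if PySem.List.pyGetD st1.1 (2*i + 1) 0 ≥ PySem.List.pyGetD st1.1 (2*i + 2) 0 then
      let move := PySem.List.pyGetD st1.1 (2*i + 1) 0 + 1 - PySem.List.pyGetD st1.1 (2*i + 2) 0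
      (PySem.List.pySetD st1.1 (2*i + 1) (PySem.List.pyGetD st1.1 (2*i + 1) 0 - move), st1.2 + move)
    else st1
  else st1


def count_zigzag_moves (numbers : List Int) : Int :=
  let total : Int := PySem.List.len numbers
  let half : Int := PySem.Int.floordiv total 2
  let oddMoves := ((PySem.List.pyRange 0 half 1).foldl (zzPass1Body total) (numbers, 0)).2
  let evenMoves := ((PySem.List.pyRange 0 half 1).foldl (zzPass2Body total) (numbers, 0)).2
  min oddMoves evenMoves


-- ===== PORT B =====
-- loop body of B's single pass; res = [cost at even indices so far, cost at odd indices so far]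
def zzAltBody (numbers : List Int) (n : Int) (res : List Int) (i : Int) : List Int :=
  let nbrs : List Int := []
  let nbrs := if 0 < i then nbrs ++ [PySem.List.pyGetD numbers (i - 1) 0] else nbrs
  let nbrs := if i + 1 < n then nbrs ++ [PySem.List.pyGetD numbers (i + 1) 0] else nbrs
  if nbrs ≠ [] then
    let j := PySem.Int.mod i 2
    PySem.List.pySetD res j
      (PySem.List.pyGetD res j 0 +
        max (PySem.List.pyGetD numbers i 0 - (PySem.List.min? nbrs (fun x => x)).getD 0 + 1) 0)
  else res

def count_zigzag_moves_alt (numbers : List Int) : Int :=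
  let n : Int := PySem.List.len numbers
  let res := (PySem.List.pyRange 0 n 1).foldl (zzAltBody numbers n) [0, 0]
  (PySem.List.min? res (fun x => x)).getD 0


-- ===== PRECONDITION & SPEC =====
def Spec_count_zigzag_moves (numbers : List Int) (out : Int) : Prop := out = count_zigzag_moves_alt numbers
instance (numbers : List Int) (out : Int) : Decidable (Spec_count_zigzag_moves numbers out) := by unfold Spec_count_zigzag_moves; infer_instance

-- ===== CLAIM (what is proved, stated in full; the proofs are below) =====
def Claim_equal_count_zigzag_moves : Prop := ∀ (numbers : List Int), Dom_count_zigzag_moves numbers → Spec_count_zigzag_moves numbers (count_zigzag_moves numbers)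

-- ===== LEMMAS AND PROOFS =====

-- B's per-index contribution: max(numbers[j] - min(existing neighbors) + 1, 0); 0 when no neighbor exists
def zzCost (xs : List Int) (j : Nat) : Int :=
  if j = 0 then (if 2 ≤ xs.length then max (xs.getD 0 0 - xs.getD 1 0 + 1) 0 else 0)
  else if j + 1 < xs.length then max (xs.getD j 0 - min (xs.getD (j-1) 0) (xs.getD (j+1) 0) + 1) 0
  else max (xs.getD j 0 - xs.getD (j-1) 0 + 1) 0


theorem min2_eq (l r : Int) : (PySem.List.min? [l, r] (fun x => x)).getD 0 = min l r := by
  simp [PySem.List.min?, List.foldl, min_def]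
  split_ifs <;> simp <;> omega

theorem min1_eq (l : Int) : (PySem.List.min? [l] (fun x => x)).getD 0 = l := by
  simp [PySem.List.min?, List.foldl]

theorem setD0 (a b v : Int) : PySem.List.pySetD [a, b] 0 v = [v, b] := by rfl
theorem setD1 (a b v : Int) : PySem.List.pySetD [a, b] 1 v = [a, v] := by rfl
theorem getD0 (a b : Int) : PySem.List.pyGetD [a, b] 0 0 = a := by rfl
theorem getD1 (a b : Int) : PySem.List.pyGetD [a, b] 1 0 = b := by rfl
theorem getDi0 (xs : List Int) : PySem.List.pyGetD xs 0 0 = xs.getD 0 0 := by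
  simpa using PySem.List.pyGetD_natCast xs 0 (0:Int)
theorem getDi1 (xs : List Int) : PySem.List.pyGetD xs 1 0 = xs.getD 1 0 := by
  simpa using PySem.List.pyGetD_natCast xs 1 (0:Int)


theorem altStep (xs : List Int) (k : Nat) (hk : k < xs.length) (a b : Int) :
    zzAltBody xs (xs.length : Int) [a, b] (k : Int) =
      if k % 2 = 0 then [a + zzCost xs k, b] else [a, b + zzCost xs k] := by
  have hm2 : PySem.Int.mod (k : Int) 2 = ((k % 2 : Nat) : Int) := by
    exact_mod_cast PySem.Int.mod_natCast k 2
  by_cases h0 : k = 0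
  · subst h0
    by_cases hl : (0 : Int) + 1 < (xs.length : Int)
    · have hl' : 2 ≤ xs.length := by omega
      simp only [zzAltBody, Nat.cast_zero, if_neg (by omega : ¬ (0:Int) < 0), if_pos hl,
        List.nil_append, ne_eq, List.cons_ne_nil, not_false_eq_true, if_true]
      rw [show (0:Int) + 1 = (1:Int) by norm_num]
      simp [min1_eq, zzCost, hl', setD0, getD0, getDi0, getDi1,
        show PySem.Int.mod (0:Int) 2 = 0 from rfl]
    · have hl' : ¬ 2 ≤ xs.length := by omega
      simp [zzAltBody, if_neg hl, zzCost, hl']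
      exact fun h => absurd h hl'
  · have h0i : (0:Int) < (k : Int) := by omega
    have hsub : (k : Int) - 1 = ((k - 1 : Nat) : Int) := by omega
    by_cases hl : k + 1 < xs.length
    · have hli : (k : Int) + 1 < (xs.length : Int) := by omega
      simp only [zzAltBody, List.nil_append]
      rw [if_pos h0i, if_pos hli]
      simp only [List.singleton_append, ne_eq, List.cons_ne_nil, not_false_eq_true, if_true]
      rw [hsub, show (k : Int) + 1 = ((k + 1 : Nat) : Int) by omega, hm2, min2_eq]
      simp only [PySem.List.pyGetD_natCast]
      rcases Nat.mod_two_eq_zero_or_one k with h | h <;>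
        simp [h, zzCost, h0, hl, setD0, setD1, getD0, getD1]
    · have hli : ¬ ((k : Int) + 1 < (xs.length : Int)) := by omega
      simp only [zzAltBody, List.nil_append, List.singleton_append]
      rw [if_pos h0i, if_neg hli]
      simp only [ne_eq, List.cons_ne_nil, not_false_eq_true, if_true]
      rw [hsub, hm2, min1_eq]
      simp only [PySem.List.pyGetD_natCast]
      rcases Nat.mod_two_eq_zero_or_one k with h | h <;>
        simp [h, zzCost, h0, hl, setD0, setD1, getD0, getD1]


-- sum of zzCost over indices < k of parity p
def zzSum (xs : List Int) (p : Nat) : Nat → Int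
  | 0 => 0
  | k+1 => zzSum xs p k + (if k % 2 = p then zzCost xs k else 0)

theorem zzSum_succ_even (xs : List Int) (k : Nat) (h : k % 2 = 0) :
    zzSum xs 0 (k+1) = zzSum xs 0 k + zzCost xs k ∧ zzSum xs 1 (k+1) = zzSum xs 1 k := by
  simp [zzSum, h]

theorem zzSum_succ_odd (xs : List Int) (k : Nat) (h : k % 2 = 1) :
    zzSum xs 0 (k+1) = zzSum xs 0 k ∧ zzSum xs 1 (k+1) = zzSum xs 1 k + zzCost xs k := by
  simp [zzSum, h]


theorem altFold (xs : List Int) (k : Nat) (hk : k ≤ xs.length) :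
    (List.range k).foldl (fun (res : List Int) (j : Nat) => zzAltBody xs (xs.length : Int) res (j : Int)) [0, 0] =
      [zzSum xs 0 k, zzSum xs 1 k] := by
  induction k with
  | zero => simp [zzSum]
  | succ k ih =>
    rw [List.range_succ, List.foldl_append, ih (by omega)]
    simp only [List.foldl_cons, List.foldl_nil]
    rw [altStep xs k (by omega)]
    rcases Nat.mod_two_eq_zero_or_one k with h | h
    · simp [h, (zzSum_succ_even xs k h).1, (zzSum_succ_even xs k h).2]
    · simp [h, (zzSum_succ_odd xs k h).1, (zzSum_succ_odd xs k h).2]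


theorem alt_eq (xs : List Int) :
    count_zigzag_moves_alt xs = min (zzSum xs 0 xs.length) (zzSum xs 1 xs.length) := by
  simp only [count_zigzag_moves_alt, PySem.List.len_eq]
  rw [PySem.List.pyRange_one]
  simp only [sub_zero, Int.toNat_natCast, List.foldl_map, zero_add]
  rw [altFold xs xs.length le_rfl]
  rw [min2_eq]


theorem getD_set_eq (l : List Int) (i j : Nat) (v : Int) :
    (l.set i v).getD j 0 = if i = j ∧ j < l.length then v else l.getD j 0 := by
  simp only [List.getD, List.getElem?_set]
  by_cases h1 : i = j
  · subst h1
    by_cases h2 : i < l.length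
    · simp [h2]
    · simp [h2]
  · simp [h1]

theorem getD_set_self (l : List Int) (i : Nat) (v : Int) (h : i < l.length) :
    (l.set i v).getD i 0 = v := by
  rw [getD_set_eq]; simp [h]


set_option maxHeartbeats 2000000 in
theorem pass1Step (xs l : List Int) (m : Int) (k : Nat) (hk : 2*k + 2 ≤ xs.length)
    (hlen : l.length = xs.length)
    (hget : ∀ j, 2*k ≤ j → j < xs.length →
      l.getD j 0 = if j = 2*k ∧ 0 < k then min (xs.getD j 0) (xs.getD (j-1) 0 - 1) else xs.getD j 0)
    (hm : m = zzSum xs 0 (2*k) +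
      (if 0 < k ∧ 2*k < xs.length then max (xs.getD (2*k) 0 - xs.getD (2*k-1) 0 + 1) 0 else 0)) :
    (zzPass1Body (xs.length : Int) (l, m) (k : Int)).2 = zzSum xs 0 (2*(k+1)) +
      (if 0 < k+1 ∧ 2*(k+1) < xs.length then max (xs.getD (2*(k+1)) 0 - xs.getD (2*(k+1)-1) 0 + 1) 0 else 0) ∧
    (zzPass1Body (xs.length : Int) (l, m) (k : Int)).1.length = xs.length ∧
    ∀ j, 2*(k+1) ≤ j → j < xs.length →
      (zzPass1Body (xs.length : Int) (l, m) (k : Int)).1.getD j 0 =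
        if j = 2*(k+1) ∧ 0 < k+1 then min (xs.getD j 0) (xs.getD (j-1) 0 - 1) else xs.getD j 0 := by
  have e1 : 2*(k:Int) = ((2*k : Nat) : Int) := by push_cast; ring
  have e2 : 2*(k:Int) + 1 = ((2*k+1 : Nat) : Int) := by push_cast; ring
  have e3 : 2*(k:Int) + 2 = ((2*k+2 : Nat) : Int) := by push_cast; ring
  have hw' : l.getD (2*k+1) 0 = xs.getD (2*k+1) 0 := by
    rw [hget (2*k+1) (by omega) (by omega)]; simp [show ¬(2*k+1 = 2*k ∧ 0 < k) by omega]
  have hS : zzSum xs 0 (2*(k+1)) = zzSum xs 0 (2*k) + zzCost xs (2*k) := by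
    have e : 2*(k+1) = (2*k+1)+1 := by ring
    rw [e, (zzSum_succ_odd xs (2*k+1) (by omega)).1, (zzSum_succ_even xs (2*k) (by omega)).1]
  have hkey : (0 < k ∧ l.getD (2*k) 0 = min (xs.getD (2*k) 0) (xs.getD (2*k-1) 0 - 1) ∧
        m = zzSum xs 0 (2*k) + max (xs.getD (2*k) 0 - xs.getD (2*k-1) 0 + 1) 0 ∧
        zzCost xs (2*k) = max (xs.getD (2*k) 0 - min (xs.getD (2*k-1) 0) (xs.getD (2*k+1) 0) + 1) 0) ∨
      (k = 0 ∧ l.getD (2*k) 0 = xs.getD (2*k) 0 ∧ m = zzSum xs 0 (2*k) ∧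
        zzCost xs (2*k) = max (xs.getD (2*k) 0 - xs.getD (2*k+1) 0 + 1) 0) := by
    by_cases h0 : 0 < k
    · refine Or.inl ⟨h0, ?_, ?_, ?_⟩
      · rw [hget (2*k) le_rfl (by omega)]; simp [h0]
      · rw [hm, if_pos ⟨h0, by omega⟩]
      · simp only [zzCost]
        simp [show ¬ (2*k = 0) by omega, show 2*k+1 < xs.length by omega]
    · have h0' : k = 0 := by omega
      subst h0'
      refine Or.inr ⟨rfl, ?_, ?_, ?_⟩
      · rw [hget 0 le_rfl (by omega)]; simp
      · rw [hm]; simp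
      · simp only [zzCost]
        simp [show (2:Nat)*0 = 0 by rfl, show (2 ≤ xs.length) by omega]
  have hset1 : ∀ v : Int, (l.set (2*k) v).getD (2*k+1) 0 = l.getD (2*k+1) 0 := fun v => by
    rw [getD_set_eq]; simp [show ¬(2*k = 2*k+1 ∧ 2*k+1 < l.length) by omega]
  have hset2 : ∀ v : Int, (l.set (2*k) v).getD (2*k+2) 0 = l.getD (2*k+2) 0 := fun v => by
    rw [getD_set_eq]; simp [show ¬(2*k = 2*k+2 ∧ 2*k+2 < l.length) by omega]
  have hgj : ∀ j, 2*k+2 < j → j < xs.length → l.getD j 0 = xs.getD j 0 := fun j hj hh => by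
    rw [hget j (by omega) hh]; simp [show ¬(j = 2*k ∧ 0 < k) by omega]
  simp only [zzPass1Body]
  rw [e3, e2, e1]
  simp only [PySem.List.pyGetD_natCast, PySem.List.pySetD_natCast]
  by_cases hb1 : l.getD (2*k) 0 ≥ l.getD (2*k+1) 0
  · rw [if_pos hb1]
    dsimp only
    by_cases hc2 : 2*k+2 < xs.length
    · rw [if_pos (show ((2*k+2 : Nat) : Int) < (xs.length : Int) by omega)]
      have hr : l.getD (2*k+2) 0 = xs.getD (2*k+2) 0 := by
        rw [hget (2*k+2) (by omega) hc2]; simp [show ¬(2*k+2 = 2*k ∧ 0 < k) by omega]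
      have hpart : (if 0 < k+1 ∧ 2*(k+1) < xs.length then max (xs.getD (2*(k+1)) 0 - xs.getD (2*(k+1)-1) 0 + 1) 0 else 0)
          = max (xs.getD (2*k+2) 0 - xs.getD (2*k+1) 0 + 1) 0 := by
        rw [if_pos (show 0 < k+1 ∧ 2*(k+1) < xs.length by omega),
          show 2*(k+1) = 2*k+2 by ring, show 2*k+2-1 = 2*k+1 by omega]
      simp only [hset1, hset2, hw', hr]
      by_cases hb2 : xs.getD (2*k+2) 0 ≥ xs.getD (2*k+1) 0 <;>
        [rw [if_pos hb2]; rw [if_neg hb2]] <;> dsimp only <;>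
        refine ⟨?_, ?_, ?_⟩
      · rw [hS, hpart]
        first | (rw [hw'] at hb1; omega) | omega
      · simp [List.length_set, hlen]
      · intro j hj1 hj2
        by_cases hje : j = 2*k+2
        · subst hje
          rw [if_pos (show 2*k+2 = 2*(k+1) ∧ 0 < k+1 by omega), show 2*k+2-1 = 2*k+1 by omega]
          first
          | (rw [getD_set_self] <;> (try simp only [List.length_set, hlen]) <;> omega)
          | (rw [hset2, hr]; omega)
          | (rw [hr]; omega)
        · rw [if_neg (by omega)]
          first
          | exact hgj j (by omega) hj2
          | (rw [getD_set_eq]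
             simp only [List.length_set, hlen]
             rw [if_neg (by omega)]
             first
             | exact hgj j (by omega) hj2
             | (rw [getD_set_eq]; simp only [List.length_set, hlen]; rw [if_neg (by omega)]; exact hgj j (by omega) hj2))
      · rw [hS, hpart]
        first | (rw [hw'] at hb1; omega) | omega
      · simp [List.length_set, hlen]
      · intro j hj1 hj2
        by_cases hje : j = 2*k+2
        · subst hje
          rw [if_pos (show 2*k+2 = 2*(k+1) ∧ 0 < k+1 by omega), show 2*k+2-1 = 2*k+1 by omega]
          first
          | (rw [getD_set_self] <;> (try simp only [List.length_set, hlen]) <;> omega)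
          | (rw [hset2, hr]; omega)
          | (rw [hr]; omega)
        · rw [if_neg (by omega)]
          first
          | exact hgj j (by omega) hj2
          | (rw [getD_set_eq]
             simp only [List.length_set, hlen]
             rw [if_neg (by omega)]
             first
             | exact hgj j (by omega) hj2
             | (rw [getD_set_eq]; simp only [List.length_set, hlen]; rw [if_neg (by omega)]; exact hgj j (by omega) hj2))
    · rw [if_neg (show ¬ ((2*k+2 : Nat) : Int) < (xs.length : Int) by omega)]
      have hpart : (if 0 < k+1 ∧ 2*(k+1) < xs.length then max (xs.getD (2*(k+1)) 0 - xs.getD (2*(k+1)-1) 0 + 1) 0 else 0) = 0 := by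
        rw [if_neg (by omega)]
      refine ⟨?_, ?_, ?_⟩
      · rw [hS, hpart]
        first | (rw [hw'] at hb1; omega) | omega
      · simp [List.length_set, hlen]
      · intro j hj1 hj2; omega
  · rw [if_neg hb1]
    dsimp only
    by_cases hc2 : 2*k+2 < xs.length
    · rw [if_pos (show ((2*k+2 : Nat) : Int) < (xs.length : Int) by omega)]
      have hr : l.getD (2*k+2) 0 = xs.getD (2*k+2) 0 := by
        rw [hget (2*k+2) (by omega) hc2]; simp [show ¬(2*k+2 = 2*k ∧ 0 < k) by omega]
      have hpart : (if 0 < k+1 ∧ 2*(k+1) < xs.length then max (xs.getD (2*(k+1)) 0 - xs.getD (2*(k+1)-1) 0 + 1) 0 else 0)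
          = max (xs.getD (2*k+2) 0 - xs.getD (2*k+1) 0 + 1) 0 := by
        rw [if_pos (show 0 < k+1 ∧ 2*(k+1) < xs.length by omega),
          show 2*(k+1) = 2*k+2 by ring, show 2*k+2-1 = 2*k+1 by omega]
      simp only [hset1, hset2, hw', hr]
      by_cases hb2 : xs.getD (2*k+2) 0 ≥ xs.getD (2*k+1) 0 <;>
        [rw [if_pos hb2]; rw [if_neg hb2]] <;> dsimp only <;>
        refine ⟨?_, ?_, ?_⟩
      · rw [hS, hpart]
        first | (rw [hw'] at hb1; omega) | omega
      · simp [List.length_set, hlen]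
      · intro j hj1 hj2
        by_cases hje : j = 2*k+2
        · subst hje
          rw [if_pos (show 2*k+2 = 2*(k+1) ∧ 0 < k+1 by omega), show 2*k+2-1 = 2*k+1 by omega]
          first
          | (rw [getD_set_self] <;> (try simp only [List.length_set, hlen]) <;> omega)
          | (rw [hset2, hr]; omega)
          | (rw [hr]; omega)
        · rw [if_neg (by omega)]
          first
          | exact hgj j (by omega) hj2
          | (rw [getD_set_eq]
             simp only [List.length_set, hlen]
             rw [if_neg (by omega)]
             first
             | exact hgj j (by omega) hj2
             | (rw [getD_set_eq]; simp only [List.length_set, hlen]; rw [if_neg (by omega)]; exact hgj j (by omega) hj2))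
      · rw [hS, hpart]
        first | (rw [hw'] at hb1; omega) | omega
      · simp [List.length_set, hlen]
      · intro j hj1 hj2
        by_cases hje : j = 2*k+2
        · subst hje
          rw [if_pos (show 2*k+2 = 2*(k+1) ∧ 0 < k+1 by omega), show 2*k+2-1 = 2*k+1 by omega]
          first
          | (rw [getD_set_self] <;> (try simp only [List.length_set, hlen]) <;> omega)
          | (rw [hset2, hr]; omega)
          | (rw [hr]; omega)
        · rw [if_neg (by omega)]
          first
          | exact hgj j (by omega) hj2
          | (rw [getD_set_eq]
             simp only [List.length_set, hlen]
             rw [if_neg (by omega)]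
             first
             | exact hgj j (by omega) hj2
             | (rw [getD_set_eq]; simp only [List.length_set, hlen]; rw [if_neg (by omega)]; exact hgj j (by omega) hj2))
    · rw [if_neg (show ¬ ((2*k+2 : Nat) : Int) < (xs.length : Int) by omega)]
      have hpart : (if 0 < k+1 ∧ 2*(k+1) < xs.length then max (xs.getD (2*(k+1)) 0 - xs.getD (2*(k+1)-1) 0 + 1) 0 else 0) = 0 := by
        rw [if_neg (by omega)]
      refine ⟨?_, ?_, ?_⟩
      · rw [hS, hpart]
        first | (rw [hw'] at hb1; omega) | omega
      · simp [List.length_set, hlen]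
      · intro j hj1 hj2; omega


set_option maxHeartbeats 2000000 in
theorem pass2Step (xs l : List Int) (m : Int) (k : Nat) (hk : 2*k + 2 ≤ xs.length)
    (hlen : l.length = xs.length)
    (hget : ∀ j, 2*k ≤ j → j < xs.length → l.getD j 0 = xs.getD j 0)
    (hm : m = zzSum xs 1 (2*k)) :
    (zzPass2Body (xs.length : Int) (l, m) (k : Int)).2 = zzSum xs 1 (2*(k+1)) ∧
    (zzPass2Body (xs.length : Int) (l, m) (k : Int)).1.length = xs.length ∧
    ∀ j, 2*(k+1) ≤ j → j < xs.length →
      (zzPass2Body (xs.length : Int) (l, m) (k : Int)).1.getD j 0 = xs.getD j 0 := by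
  have e1 : 2*(k:Int) = ((2*k : Nat) : Int) := by push_cast; ring
  have e2 : 2*(k:Int) + 1 = ((2*k+1 : Nat) : Int) := by push_cast; ring
  have e3 : 2*(k:Int) + 2 = ((2*k+2 : Nat) : Int) := by push_cast; ring
  have hu : l.getD (2*k) 0 = xs.getD (2*k) 0 := hget (2*k) le_rfl (by omega)
  have hw : l.getD (2*k+1) 0 = xs.getD (2*k+1) 0 := hget (2*k+1) (by omega) (by omega)
  have hS2 : zzSum xs 1 (2*(k+1)) = zzSum xs 1 (2*k) + zzCost xs (2*k+1) := by
    have e : 2*(k+1) = (2*k+1)+1 := by ring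
    rw [e, (zzSum_succ_odd xs (2*k+1) (by omega)).2, (zzSum_succ_even xs (2*k) (by omega)).2]
  have hsetself : ∀ v : Int, (l.set (2*k+1) v).getD (2*k+1) 0 = v := fun v =>
    getD_set_self l (2*k+1) v (by omega)
  have hsetr : ∀ v : Int, (l.set (2*k+1) v).getD (2*k+2) 0 = l.getD (2*k+2) 0 := fun v => by
    rw [getD_set_eq]; simp [show ¬(2*k+1 = 2*k+2 ∧ 2*k+2 < l.length) by omega]
  simp only [zzPass2Body]
  rw [e3, e2, e1]
  simp only [PySem.List.pyGetD_natCast, PySem.List.pySetD_natCast]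
  by_cases hb1 : l.getD (2*k+1) 0 ≥ l.getD (2*k) 0
  · rw [if_pos hb1]
    dsimp only
    by_cases hc2 : 2*k+2 < xs.length
    · rw [if_pos (show ((2*k+2 : Nat) : Int) < (xs.length : Int) by omega)]
      have hr2 : l.getD (2*k+2) 0 = xs.getD (2*k+2) 0 := hget (2*k+2) (by omega) hc2
      have hC2p : zzCost xs (2*k+1) = max (xs.getD (2*k+1) 0 - min (xs.getD (2*k) 0) (xs.getD (2*k+2) 0) + 1) 0 := by
        simp only [zzCost, show ¬(2*k+1 = 0) by omega, if_neg, if_false]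
        rw [if_pos (show 2*k+1+1 < xs.length by omega), show 2*k+1-1 = 2*k by omega,
          show 2*k+1+1 = 2*k+2 by omega]
        try simp [show ¬(2*k+1 = 0) by omega]
      simp only [hsetself, hsetr, hw, hu, hr2]
      by_cases hb2 : xs.getD (2*k+1) 0 - (xs.getD (2*k+1) 0 + 1 - xs.getD (2*k) 0) ≥ xs.getD (2*k+2) 0 <;>
        [rw [if_pos hb2]; rw [if_neg hb2]] <;> dsimp only <;>
        refine ⟨?_, ?_, ?_⟩
      · rw [hS2, hC2p]; omega
      · simp [List.length_set, hlen]
      · intro j hj1 hj2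
        first
        | exact hget j (by omega) hj2
        | (rw [getD_set_eq]
           simp only [List.length_set, hlen]
           rw [if_neg (by omega)]
           first
           | exact hget j (by omega) hj2
           | (rw [getD_set_eq]
              simp only [List.length_set, hlen]
              rw [if_neg (by omega)]
              exact hget j (by omega) hj2))
      · rw [hS2, hC2p]; omega
      · simp [List.length_set, hlen]
      · intro j hj1 hj2
        first
        | exact hget j (by omega) hj2
        | (rw [getD_set_eq]
           simp only [List.length_set, hlen]
           rw [if_neg (by omega)]
           first
           | exact hget j (by omega) hj2
           | (rw [getD_set_eq]
              simp only [List.length_set, hlen]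
              rw [if_neg (by omega)]
              exact hget j (by omega) hj2))
    · rw [if_neg (show ¬ ((2*k+2 : Nat) : Int) < (xs.length : Int) by omega)]
      have hC2n : zzCost xs (2*k+1) = max (xs.getD (2*k+1) 0 - xs.getD (2*k) 0 + 1) 0 := by
        simp only [zzCost]
        rw [if_neg (show ¬ 2*k+1+1 < xs.length by omega)]
        simp [show ¬(2*k+1 = 0) by omega, show 2*k+1-1 = 2*k by omega]
      refine ⟨?_, ?_, ?_⟩
      · rw [hS2, hC2n]
        first | (simp only [hw, hu] at hb1; omega) | omega
      · simp [List.length_set, hlen]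
      · intro j hj1 hj2; omega
  · rw [if_neg hb1]
    dsimp only
    by_cases hc2 : 2*k+2 < xs.length
    · rw [if_pos (show ((2*k+2 : Nat) : Int) < (xs.length : Int) by omega)]
      have hr2 : l.getD (2*k+2) 0 = xs.getD (2*k+2) 0 := hget (2*k+2) (by omega) hc2
      have hC2p : zzCost xs (2*k+1) = max (xs.getD (2*k+1) 0 - min (xs.getD (2*k) 0) (xs.getD (2*k+2) 0) + 1) 0 := by
        simp only [zzCost, show ¬(2*k+1 = 0) by omega, if_neg, if_false]
        rw [if_pos (show 2*k+1+1 < xs.length by omega), show 2*k+1-1 = 2*k by omega,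
          show 2*k+1+1 = 2*k+2 by omega]
        try simp [show ¬(2*k+1 = 0) by omega]
      simp only [hsetself, hsetr, hw, hu, hr2]
      by_cases hb2 : xs.getD (2*k+1) 0 ≥ xs.getD (2*k+2) 0 <;>
        [rw [if_pos hb2]; rw [if_neg hb2]] <;> dsimp only <;>
        refine ⟨?_, ?_, ?_⟩
      · rw [hS2, hC2p]; omega
      · simp [List.length_set, hlen]
      · intro j hj1 hj2
        first
        | exact hget j (by omega) hj2
        | (rw [getD_set_eq]
           simp only [List.length_set, hlen]
           rw [if_neg (by omega)]
           first
           | exact hget j (by omega) hj2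
           | (rw [getD_set_eq]
              simp only [List.length_set, hlen]
              rw [if_neg (by omega)]
              exact hget j (by omega) hj2))
      · rw [hS2, hC2p]; omega
      · simp [List.length_set, hlen]
      · intro j hj1 hj2
        first
        | exact hget j (by omega) hj2
        | (rw [getD_set_eq]
           simp only [List.length_set, hlen]
           rw [if_neg (by omega)]
           first
           | exact hget j (by omega) hj2
           | (rw [getD_set_eq]
              simp only [List.length_set, hlen]
              rw [if_neg (by omega)]
              exact hget j (by omega) hj2))
    · rw [if_neg (show ¬ ((2*k+2 : Nat) : Int) < (xs.length : Int) by omega)]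
      have hC2n : zzCost xs (2*k+1) = max (xs.getD (2*k+1) 0 - xs.getD (2*k) 0 + 1) 0 := by
        simp only [zzCost]
        rw [if_neg (show ¬ 2*k+1+1 < xs.length by omega)]
        simp [show ¬(2*k+1 = 0) by omega, show 2*k+1-1 = 2*k by omega]
      refine ⟨?_, ?_, ?_⟩
      · rw [hS2, hC2n]
        first | (simp only [hw, hu] at hb1; omega) | omega
      · simp [List.length_set, hlen]
      · intro j hj1 hj2; omega


theorem pass1Fold (xs : List Int) : ∀ k, 2*k ≤ xs.length →
    ((List.range k).foldl (fun (st : List Int × Int) (j : Nat) => zzPass1Body (xs.length : Int) st (j : Int)) (xs, 0)).2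
      = zzSum xs 0 (2*k) + (if 0 < k ∧ 2*k < xs.length then max (xs.getD (2*k) 0 - xs.getD (2*k-1) 0 + 1) 0 else 0) ∧
    ((List.range k).foldl (fun (st : List Int × Int) (j : Nat) => zzPass1Body (xs.length : Int) st (j : Int)) (xs, 0)).1.length = xs.length ∧
    ∀ j, 2*k ≤ j → j < xs.length →
      ((List.range k).foldl (fun (st : List Int × Int) (j : Nat) => zzPass1Body (xs.length : Int) st (j : Int)) (xs, 0)).1.getD j 0
        = if j = 2*k ∧ 0 < k then min (xs.getD j 0) (xs.getD (j-1) 0 - 1) else xs.getD j 0 := by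
  intro k
  induction k with
  | zero =>
    intro hk
    refine ⟨by simp [zzSum], rfl, ?_⟩
    intro j hj1 hj2
    simp
  | succ k ih =>
    intro hk
    obtain ⟨h2, hlen, hget⟩ := ih (by omega)
    rcases hst : (List.range k).foldl (fun (st : List Int × Int) (j : Nat) => zzPass1Body (xs.length : Int) st (j : Int)) (xs, 0) with ⟨l, mm⟩
    rw [hst] at h2 hlen hget
    rw [List.range_succ, List.foldl_append, hst]
    simp only [List.foldl_cons, List.foldl_nil]
    exact pass1Step xs l mm k (by omega) hlen hget h2

theorem pass2Fold (xs : List Int) : ∀ k, 2*k ≤ xs.length →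
    ((List.range k).foldl (fun (st : List Int × Int) (j : Nat) => zzPass2Body (xs.length : Int) st (j : Int)) (xs, 0)).2
      = zzSum xs 1 (2*k) ∧
    ((List.range k).foldl (fun (st : List Int × Int) (j : Nat) => zzPass2Body (xs.length : Int) st (j : Int)) (xs, 0)).1.length = xs.length ∧
    ∀ j, 2*k ≤ j → j < xs.length →
      ((List.range k).foldl (fun (st : List Int × Int) (j : Nat) => zzPass2Body (xs.length : Int) st (j : Int)) (xs, 0)).1.getD j 0
        = xs.getD j 0 := by
  intro k
  induction k with
  | zero =>
    intro hk
    exact ⟨by simp [zzSum], rfl, fun j hj1 hj2 => rfl⟩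
  | succ k ih =>
    intro hk
    obtain ⟨h2, hlen, hget⟩ := ih (by omega)
    rcases hst : (List.range k).foldl (fun (st : List Int × Int) (j : Nat) => zzPass2Body (xs.length : Int) st (j : Int)) (xs, 0) with ⟨l, mm⟩
    rw [hst] at h2 hlen hget
    rw [List.range_succ, List.foldl_append, hst]
    simp only [List.foldl_cons, List.foldl_nil]
    exact pass2Step xs l mm k (by omega) hlen hget h2

theorem zzSum_finals (xs : List Int) :
    zzSum xs 0 (2*(xs.length/2)) +
      (if 0 < xs.length/2 ∧ 2*(xs.length/2) < xs.length then
        max (xs.getD (2*(xs.length/2)) 0 - xs.getD (2*(xs.length/2)-1) 0 + 1) 0 else 0)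
      = zzSum xs 0 xs.length ∧
    zzSum xs 1 (2*(xs.length/2)) = zzSum xs 1 xs.length := by
  rcases Nat.even_or_odd xs.length with ⟨m, hm⟩ | ⟨m, hm⟩
  · have e : 2*(xs.length/2) = xs.length := by omega
    rw [e, if_neg (by omega)]
    simp
  · have hdiv : xs.length/2 = m := by omega
    rw [hdiv]
    by_cases hm0 : m = 0
    · subst hm0
      rw [if_neg (by omega)]
      have h1 : xs.length = 1 := by omega
      constructor
      · rw [h1]
        simp [zzSum, zzCost, h1]
      · rw [h1]
        simp [zzSum]
    · rw [if_pos ⟨by omega, by omega⟩]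
      have hC : zzCost xs (2*m) = max (xs.getD (2*m) 0 - xs.getD (2*m-1) 0 + 1) 0 := by
        simp only [zzCost]
        rw [if_neg (show ¬ 2*m = 0 by omega), if_neg (show ¬ 2*m+1 < xs.length by omega)]
      constructor
      · rw [hm, (zzSum_succ_even xs (2*m) (by omega)).1, hC]
      · rw [hm, (zzSum_succ_even xs (2*m) (by omega)).2]


theorem a_eq (xs : List Int) :
    count_zigzag_moves xs = min (zzSum xs 0 xs.length) (zzSum xs 1 xs.length) := by
  have hfd : PySem.Int.floordiv ((xs.length : Int)) 2 = ((xs.length/2 : Nat) : Int) := by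
    exact_mod_cast PySem.Int.floordiv_natCast xs.length 2
  simp only [count_zigzag_moves, PySem.List.len_eq, hfd]
  rw [PySem.List.pyRange_one]
  simp only [sub_zero, Int.toNat_natCast, List.foldl_map, zero_add]
  obtain ⟨h2a, -, -⟩ := pass1Fold xs (xs.length/2) (by omega)
  obtain ⟨h2b, -, -⟩ := pass2Fold xs (xs.length/2) (by omega)
  rw [h2a, h2b, (zzSum_finals xs).1, (zzSum_finals xs).2]


-- ===== VERDICT (by name: the statement is the Claim_ definition above) =====
theorem count_zigzag_moves_spec : Claim_equal_count_zigzag_moves := by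
  intro numbers _
  show count_zigzag_moves numbers = count_zigzag_moves_alt numbers
  rw [a_eq, alt_eq]
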